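-- pv_equiv track=rewrite | github.com/achyuthrachur/DCF---Deposits | src/ui/cli.py | _infer_defaults
-- ===== SOURCE A (Python) =====
-- from typing import Dict, Iterable, List, Optional
--
-- REQUIRED_FIELDS = {
--     "account_id": "Unique account identifier",
--     "balance": "Current balance column",
--     "interest_rate": "Current interest rate column (decimal)",
-- }
--
-- OPTIONAL_FIELDS = {
--     "account_type": "Account type (for segmentation)",
--     "customer_segment": "Customer segment (for segmentation)",
--     "rate_type": "Fixed/Variable/Tiered (optional metadata)",
-- }
--
-- def _infer_defaults(columns: Iterable[str]) -> Dict[str, str]: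
--     """Suggest default mappings based on column names."""
--     columns_lower = {col.lower(): col for col in columns}
--     defaults: Dict[str, str] = {}
--     for canonical, _ in REQUIRED_FIELDS.items():
--         for candidate in columns_lower:
--             if candidate == canonical or candidate.replace("_", "") == canonical.replace("_", ""):
--                 defaults[canonical] = columns_lower[candidate]
--                 break
--     for optional in OPTIONAL_FIELDS:
--         for candidate in columns_lower:
--             if candidate == optional or candidate.replace("_", "") == optional.replace("_", ""):
--                 defaults[optional] = columns_lower[candidate]
--                 break
--     return defaults
-- ===== SOURCE B (Python) =====
-- REQUIRED_FIELDS = {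
--     "account_id": "Unique account identifier",
--     "balance": "Current balance column",
--     "interest_rate": "Current interest rate column (decimal)",
-- }
--
-- OPTIONAL_FIELDS = {
--     "account_type": "Account type (for segmentation)",
--     "customer_segment": "Customer segment (for segmentation)",
--     "rate_type": "Fixed/Variable/Tiered (optional metadata)",
-- }
--
-- def _infer_defaults(columns):
--     """Suggest default mappings via a one-pass normalization index."""
--     columns_lower = {col.lower(): col for col in columns}
--     index = {}
--     for low, orig in columns_lower.items():
--         index.setdefault(low.replace("_", ""), orig)
--     defaults = {}
--     for canonical in list(REQUIRED_FIELDS) + list(OPTIONAL_FIELDS):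
--         hit = index.get(canonical.replace("_", ""))
--         if hit is not None:
--             defaults[canonical] = hit
--     return defaults
-- ===== Notes on version B (the rewrite author's own statement) =====
-- stated objective: alternative
-- what changed: Replaces the per-field rescan of all columns with a normalization index built in one pass over the deduped lowercase columns (setdefault keeps the first match per underscore-stripped form), then a direct lookup per canonical field.
import Mathlib
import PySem

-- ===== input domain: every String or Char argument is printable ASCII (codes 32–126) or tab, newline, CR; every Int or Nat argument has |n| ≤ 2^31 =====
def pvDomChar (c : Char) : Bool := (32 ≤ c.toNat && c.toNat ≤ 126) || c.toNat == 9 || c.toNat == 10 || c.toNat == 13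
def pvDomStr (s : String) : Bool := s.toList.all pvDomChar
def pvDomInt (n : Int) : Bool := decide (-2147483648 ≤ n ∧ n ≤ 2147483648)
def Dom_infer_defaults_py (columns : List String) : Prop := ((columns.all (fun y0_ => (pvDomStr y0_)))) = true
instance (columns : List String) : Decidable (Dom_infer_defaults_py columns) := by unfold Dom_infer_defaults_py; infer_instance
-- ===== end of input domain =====

-- B builds a one-pass normalization index (first occurrence per underscore-stripped lowercase key) instead of A's rescan of all columns per field; return values are proved equal.

-- ===== PORT A =====
-- inner 'for candidate in columns_lower: … break' of A, one canonical field at a time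
def pvFieldLoopA (d : PySem.Dict String String) (keys : List String) (canonical : String)
    (defaults : PySem.Dict String String) : PySem.Dict String String :=
  match keys with
  | [] => defaults
  | candidate :: rest =>
    if candidate == canonical
        || PySem.Str.replace candidate "_" "" == PySem.Str.replace canonical "_" "" then
      defaults.insert canonical (d.getD candidate "")
    else
      pvFieldLoopA d rest canonical defaults

def infer_defaults_py (columns : List String) : List (String × String) :=
  let columnsLower := columns.foldl (fun d col => d.insert (PySem.Str.lower col) col) PySem.Dict.empty
  let defaults : PySem.Dict String String :=
    (["account_id", "balance", "interest_rate"]).foldl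
      (fun defs canonical => pvFieldLoopA columnsLower columnsLower.keys canonical defs)
      PySem.Dict.empty
  let defaults :=
    (["account_type", "customer_segment", "rate_type"]).foldl
      (fun defs optional => pvFieldLoopA columnsLower columnsLower.keys optional defs)
      defaults
  defaults.items

-- ===== PORT B =====
def infer_defaults_py_alt (columns : List String) : List (String × String) :=
  let columnsLower := columns.foldl (fun d col => d.insert (PySem.Str.lower col) col) PySem.Dict.empty
  let index : PySem.Dict String String :=
    columnsLower.items.foldl
      (fun idx p => idx.setdefault (PySem.Str.replace p.1 "_" "") p.2)
      PySem.Dict.empty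
  let defaults : PySem.Dict String String :=
    (["account_id", "balance", "interest_rate"] ++ ["account_type", "customer_segment", "rate_type"]).foldl
      (fun defs canonical =>
        match index.get? (PySem.Str.replace canonical "_" "") with
        | some hit => defs.insert canonical hit
        | none => defs)
      PySem.Dict.empty
  defaults.items

-- ===== PRECONDITION & SPEC =====
def Spec_infer_defaults_py (columns : List String) (out : List (String × String)) : Prop := out = infer_defaults_py_alt columns
instance (columns : List String) (out : List (String × String)) : Decidable (Spec_infer_defaults_py columns out) := by unfold Spec_infer_defaults_py; infer_instance

-- ===== CLAIM (what is proved, stated in full; the proofs are below) =====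
def Claim_equal_infer_defaults_py : Prop := ∀ (columns : List String), Dom_infer_defaults_py columns → Spec_infer_defaults_py columns (infer_defaults_py columns)

-- ===== LEMMAS AND PROOFS =====

-- first value in L whose underscore-stripped key equals k (what B's index records for k)
def pvFirstMatch (L : List (String × String)) (k : String) : Option String :=
  (L.find? (fun p => PySem.Str.replace p.1 "_" "" == k)).map (·.2)

lemma pvBuildIndex_get? (L : List (String × String)) (idx : PySem.Dict String String) (k : String) :
    (L.foldl (fun idx p => idx.setdefault (PySem.Str.replace p.1 "_" "") p.2) idx).get? k
      = (idx.get? k).or (pvFirstMatch L k) := by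
  induction L generalizing idx with
  | nil => simp [pvFirstMatch]
  | cons p rest ih =>
    simp only [List.foldl_cons, ih, pvFirstMatch, List.find?]
    by_cases hk : PySem.Str.replace p.1 "_" "" = k
    · subst hk
      rw [PySem.Dict.get?_setdefault_self]
      simp only [beq_self_eq_true, Option.map_some]
      cases h : idx.get? (PySem.Str.replace p.1 "_" "") <;> simp
    · have hb : (PySem.Str.replace p.1 "_" "" == k) = false := beq_eq_false_iff_ne.mpr hk
      rw [PySem.Dict.get?_setdefault_of_ne _ _ (fun h => hk h.symm)]
      simp [hb]

lemma pvFieldLoopA_eq_firstMatch (d : PySem.Dict String String) (L : List (String × String))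
    (canonical : String) (defs : PySem.Dict String String)
    (hval : ∀ p ∈ L, d.getD p.1 "" = p.2) :
    pvFieldLoopA d (L.map (·.1)) canonical defs
      = match pvFirstMatch L (PySem.Str.replace canonical "_" "") with
        | some hit => defs.insert canonical hit
        | none => defs := by
  induction L with
  | nil => simp [pvFieldLoopA, pvFirstMatch]
  | cons p rest ih =>
    have hcond : (p.1 == canonical
        || PySem.Str.replace p.1 "_" "" == PySem.Str.replace canonical "_" "")
        = (PySem.Str.replace p.1 "_" "" == PySem.Str.replace canonical "_" "") := by
      by_cases he : p.1 = canonical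
      · subst he; simp
      · simp [beq_eq_false_iff_ne.mpr he]
    simp only [List.map_cons, pvFieldLoopA, hcond, pvFirstMatch, List.find?]
    by_cases hm : (PySem.Str.replace p.1 "_" "" == PySem.Str.replace canonical "_" "") = true
    · simp only [hm, if_true, Option.map_some]
      rw [hval p (List.mem_cons_self ..)]
    · simp only [hm, Bool.false_eq_true, if_false]
      exact ih (fun q hq => hval q (List.mem_cons_of_mem _ hq))

-- ===== VERDICT (by name: the statement is the Claim_ definition above) =====
theorem infer_defaults_py_spec : Claim_equal_infer_defaults_py := by
  intro columns _
  unfold Spec_infer_defaults_py infer_defaults_py infer_defaults_py_alt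
  set cl := columns.foldl (fun d col => d.insert (PySem.Str.lower col) col) PySem.Dict.empty with hcl
  have hnodup : cl.keys.Nodup := by
    rw [hcl]
    exact PySem.Dict.nodup_keys_foldl_insert_key columns (fun c => PySem.Str.lower c) _ _
      PySem.Dict.nodup_keys_empty
  have hval : ∀ p ∈ cl.items, cl.getD p.1 "" = p.2 := by
    rintro ⟨k, v⟩ hp
    exact PySem.Dict.getD_of_mem_items cl hp hnodup ""
  have hkeys : cl.keys = cl.items.map (·.1) := rfl
  have hstep : ∀ (defs : PySem.Dict String String) (canonical : String),
      pvFieldLoopA cl cl.keys canonical defs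
        = match (cl.items.foldl (fun idx p => idx.setdefault (PySem.Str.replace p.1 "_" "") p.2)
              PySem.Dict.empty).get? (PySem.Str.replace canonical "_" "") with
          | some hit => defs.insert canonical hit
          | none => defs := by
    intro defs canonical
    rw [hkeys, pvFieldLoopA_eq_firstMatch cl cl.items canonical defs hval,
      pvBuildIndex_get?]
    simp
  simp only [hstep, ← List.foldl_append]
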